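-- pv_equiv track=rewrite | github.com/inspire-group/routing-aware-dns | subprefix_hijack_analyze.py | can_subprfx_hijack
-- ===== SOURCE A (Python) =====
-- def can_subprfx_hijack(dmap, ips_to_note):
--     res_map = {}
--     # safe_domains = {r: set() for r in all_regions}
--     # bad_domains = {r: set() for r in all_regions}
--     # domains_bad_maxlen = {r: set() for r in all_regions}
--     # domains_no_roa = {r: set() for r in all_regions}
--     for domain, ips in dmap.items():
--
--         a_ips, dns_ips = ips
--
--         a_all24 = all([_ in ips_to_note['on_24orlonger_prfx'] for _ in a_ips])
--         a_allroa = all([_ in ips_to_note['have_valid_roa'] for _ in a_ips])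
--         a_allroa_goodlen = all([_ in ips_to_note['have_valid_roa'] and
--                                 _ not in ips_to_note['roa_wrong_maxlen'] for _ in a_ips])
--         a_noroa = all([_ not in ips_to_note['have_valid_roa'] for _ in a_ips]) and\
--                      (len(a_ips) > 0)
--         a_badmaxlen = any([_ in ips_to_note['roa_wrong_maxlen'] for _ in a_ips])
--         a_safe = all([((_ in ips_to_note['on_24orlonger_prfx']) or
--                        (_ in ips_to_note['have_valid_roa'] and _ not in ips_to_note['roa_wrong_maxlen']))
--                      for _ in a_ips])
--
--         ns_all24 = all([_ in ips_to_note['on_24orlonger_prfx'] for _ in dns_ips])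
--         ns_allroa = all([_ in ips_to_note['have_valid_roa'] for _ in dns_ips])
--         ns_allroa_goodlen = all([_ in ips_to_note['have_valid_roa'] and
--                                 _ not in ips_to_note['roa_wrong_maxlen'] for _ in dns_ips])
--         ns_noroa = all([_ not in ips_to_note['have_valid_roa'] for _ in dns_ips]) and\
--                       (len(dns_ips) > 0)
--         ns_badmaxlen = any([_ in ips_to_note['roa_wrong_maxlen'] for _ in dns_ips])
--         ns_safe = all([((_ in ips_to_note['on_24orlonger_prfx']) or
--                        (_ in ips_to_note['have_valid_roa'] and _ not in ips_to_note['roa_wrong_maxlen']))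
--                        for _ in dns_ips])
--
--         res_map[domain] = {'webserver': (len(a_ips), a_all24, a_allroa, a_allroa_goodlen, a_noroa, a_badmaxlen, a_safe) ,
--                            'dns': (len(dns_ips), ns_all24, ns_allroa, ns_allroa_goodlen, ns_noroa, ns_badmaxlen, ns_safe)}
--
--     return res_map
-- ===== SOURCE B (Python) =====
-- def can_subprfx_hijack(dmap, ips_to_note):
--     def classify(ips):
--         p24 = ips_to_note['on_24orlonger_prfx']
--         roa = ips_to_note['have_valid_roa']
--         badlen = ips_to_note['roa_wrong_maxlen']
--         all24 = allroa = goodlen = safe = True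
--         anyroa = badmax = False
--         for ip in ips:
--             in24 = ip in p24
--             inroa = ip in roa
--             inbad = ip in badlen
--             all24 = all24 and in24
--             allroa = allroa and inroa
--             goodlen = goodlen and (inroa and not inbad)
--             safe = safe and (in24 or (inroa and not inbad))
--             anyroa = anyroa or inroa
--             badmax = badmax or inbad
--         return (len(ips), all24, allroa, goodlen,
--                 (not anyroa) and len(ips) > 0, badmax, safe)
--
--     return {domain: {'webserver': classify(a_ips), 'dns': classify(dns_ips)}
--             for domain, (a_ips, dns_ips) in dmap.items()}
-- ===== Notes on version B (the rewrite author's own statement) =====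
-- stated objective: alternative
-- what changed: A runs six separate comprehension scans over each IP list (twelve per domain); B classifies each list in a single loop that maintains all six flags at once. Pre_ excludes inputs whose ips_to_note lacks one of the three keys (with nonempty dmap): A raises KeyError there, except in the corner where every IP list is empty, where A returns a trivial map (its comprehensions never evaluate the lookups) while B itself raises KeyError.
import Mathlib
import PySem

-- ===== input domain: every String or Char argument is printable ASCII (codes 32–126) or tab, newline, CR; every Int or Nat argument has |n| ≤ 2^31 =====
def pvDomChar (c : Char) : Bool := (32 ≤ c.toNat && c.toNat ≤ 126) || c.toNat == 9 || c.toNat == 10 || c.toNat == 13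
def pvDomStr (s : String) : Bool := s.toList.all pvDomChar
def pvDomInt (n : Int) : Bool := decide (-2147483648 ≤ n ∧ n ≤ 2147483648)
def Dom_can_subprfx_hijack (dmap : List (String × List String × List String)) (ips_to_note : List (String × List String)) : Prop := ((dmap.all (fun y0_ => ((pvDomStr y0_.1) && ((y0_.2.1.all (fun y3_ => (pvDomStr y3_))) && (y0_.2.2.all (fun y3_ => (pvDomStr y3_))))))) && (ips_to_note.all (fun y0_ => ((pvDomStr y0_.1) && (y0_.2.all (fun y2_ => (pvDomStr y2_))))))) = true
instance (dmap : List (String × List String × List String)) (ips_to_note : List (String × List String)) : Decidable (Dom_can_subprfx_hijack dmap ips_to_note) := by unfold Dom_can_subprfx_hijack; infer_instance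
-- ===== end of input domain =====

-- B replaces A's twelve per-list comprehensions (six scans of each IP list) by one helper that
-- walks each list once maintaining all six flags (objective: alternative decomposition).

-- ===== PORT A =====
-- literal port: res_map is a dict built by insertion; each comprehension is a separate scan,
-- re-looking up ips_to_note['…'] (getD is exact under Pre_, which requires the three keys).
def can_subprfx_hijack (dmap : List (String × List String × List String)) (ips_to_note : List (String × List String)) : List (String × List (String × Int × Bool × Bool × Bool × Bool × Bool × Bool)) :=
  let note := PySem.Dict.ofList ips_to_note
  ((PySem.Dict.ofList dmap).items.foldl
    (fun (res : PySem.Dict String (List (String × Int × Bool × Bool × Bool × Bool × Bool × Bool))) item =>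
      let domain := item.1
      let a_ips := item.2.1
      let dns_ips := item.2.2
      let a_all24 := a_ips.all (fun x => (note.getD "on_24orlonger_prfx" []).contains x)
      let a_allroa := a_ips.all (fun x => (note.getD "have_valid_roa" []).contains x)
      let a_allroa_goodlen := a_ips.all (fun x => (note.getD "have_valid_roa" []).contains x && !((note.getD "roa_wrong_maxlen" []).contains x))
      let a_noroa := a_ips.all (fun x => !((note.getD "have_valid_roa" []).contains x)) && decide (a_ips.length > 0)
      let a_badmaxlen := a_ips.any (fun x => (note.getD "roa_wrong_maxlen" []).contains x)
      let a_safe := a_ips.all (fun x => (note.getD "on_24orlonger_prfx" []).contains x || ((note.getD "have_valid_roa" []).contains x && !((note.getD "roa_wrong_maxlen" []).contains x)))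
      let ns_all24 := dns_ips.all (fun x => (note.getD "on_24orlonger_prfx" []).contains x)
      let ns_allroa := dns_ips.all (fun x => (note.getD "have_valid_roa" []).contains x)
      let ns_allroa_goodlen := dns_ips.all (fun x => (note.getD "have_valid_roa" []).contains x && !((note.getD "roa_wrong_maxlen" []).contains x))
      let ns_noroa := dns_ips.all (fun x => !((note.getD "have_valid_roa" []).contains x)) && decide (dns_ips.length > 0)
      let ns_badmaxlen := dns_ips.any (fun x => (note.getD "roa_wrong_maxlen" []).contains x)
      let ns_safe := dns_ips.all (fun x => (note.getD "on_24orlonger_prfx" []).contains x || ((note.getD "have_valid_roa" []).contains x && !((note.getD "roa_wrong_maxlen" []).contains x)))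
      res.insert domain
        [("webserver", ((a_ips.length : Int), a_all24, a_allroa, a_allroa_goodlen, a_noroa, a_badmaxlen, a_safe)),
         ("dns", ((dns_ips.length : Int), ns_all24, ns_allroa, ns_allroa_goodlen, ns_noroa, ns_badmaxlen, ns_safe))])
    PySem.Dict.empty).items

-- ===== PORT B =====
-- single-pass flag update for one IP
def pvClassifyStep (p24 roa badlen : List String) (s : Bool × Bool × Bool × Bool × Bool × Bool) (ip : String) : Bool × Bool × Bool × Bool × Bool × Bool :=
  let in24 := p24.contains ip
  let inroa := roa.contains ip
  let inbad := badlen.contains ip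
  (s.1 && in24, s.2.1 && inroa, s.2.2.1 && (inroa && !inbad),
   s.2.2.2.1 && (in24 || (inroa && !inbad)), s.2.2.2.2.1 || inroa, s.2.2.2.2.2 || inbad)

-- one walk over the list maintaining (all24, allroa, goodlen, safe, anyroa, badmax)
def pvClassify (note : PySem.Dict String (List String)) (ips : List String) : Int × Bool × Bool × Bool × Bool × Bool × Bool :=
  let p24 := note.getD "on_24orlonger_prfx" []
  let roa := note.getD "have_valid_roa" []
  let badlen := note.getD "roa_wrong_maxlen" []
  let s := ips.foldl (pvClassifyStep p24 roa badlen) (true, true, true, true, false, false)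
  ((ips.length : Int), s.1, s.2.1, s.2.2.1, !s.2.2.2.2.1 && decide (ips.length > 0), s.2.2.2.2.2, s.2.2.2.1)

def can_subprfx_hijack_alt (dmap : List (String × List String × List String)) (ips_to_note : List (String × List String)) : List (String × List (String × Int × Bool × Bool × Bool × Bool × Bool × Bool)) :=
  let note := PySem.Dict.ofList ips_to_note
  (PySem.Dict.ofList dmap).items.map (fun item =>
    (item.1, [("webserver", pvClassify note item.2.1),
              ("dns", pvClassify note item.2.2)]))

-- ===== PRECONDITION & SPEC =====
-- Pre_ requires the three keys A subscripts unless dmap is empty: outside it A either raises KeyError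
-- or (when dmap is nonempty but every IP list is empty, so the comprehensions never evaluate the
-- lookups) A returns while B itself raises KeyError, so there is no value for B to match there.
def Pre_can_subprfx_hijack (dmap : List (String × List String × List String)) (ips_to_note : List (String × List String)) : Prop :=
  dmap = [] ∨
  ((PySem.Dict.ofList ips_to_note).contains "on_24orlonger_prfx" = true ∧
   (PySem.Dict.ofList ips_to_note).contains "have_valid_roa" = true ∧
   (PySem.Dict.ofList ips_to_note).contains "roa_wrong_maxlen" = true)
instance (dmap : List (String × List String × List String)) (ips_to_note : List (String × List String)) : Decidable (Pre_can_subprfx_hijack dmap ips_to_note) := by unfold Pre_can_subprfx_hijack; infer_instance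
def pvWitness_can_subprfx_hijack : (List (String × List String × List String)) × (List (String × List String)) :=
  ([("ex.com", (["1.2.3.4"], ["5.6.7.8"]))],
   [("on_24orlonger_prfx", ["1.2.3.4"]), ("have_valid_roa", []), ("roa_wrong_maxlen", [])])

def Spec_can_subprfx_hijack (dmap : List (String × List String × List String)) (ips_to_note : List (String × List String)) (out : List (String × List (String × Int × Bool × Bool × Bool × Bool × Bool × Bool))) : Prop := out = can_subprfx_hijack_alt dmap ips_to_note
instance (dmap : List (String × List String × List String)) (ips_to_note : List (String × List String)) (out : List (String × List (String × Int × Bool × Bool × Bool × Bool × Bool × Bool))) : Decidable (Spec_can_subprfx_hijack dmap ips_to_note out) := by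
  unfold Spec_can_subprfx_hijack
  -- instance search alone exceeds its size limit on the 8-component tuple; assemble it stepwise
  haveI h6 : DecidableEq (Bool × Bool × Bool × Bool × Bool × Bool) := instDecidableEqProd
  haveI h7 : DecidableEq (Int × Bool × Bool × Bool × Bool × Bool × Bool) := instDecidableEqProd
  haveI h8 : DecidableEq (String × Int × Bool × Bool × Bool × Bool × Bool × Bool) := instDecidableEqProd
  haveI h9 : DecidableEq (String × List (String × Int × Bool × Bool × Bool × Bool × Bool × Bool)) := instDecidableEqProd
  exact List.hasDecEq _ _

-- ===== CLAIM (what is proved, stated in full; the proofs are below) =====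
def Claim_equal_can_subprfx_hijack : Prop := ∀ (dmap : List (String × List String × List String)) (ips_to_note : List (String × List String)), Dom_can_subprfx_hijack dmap ips_to_note → Pre_can_subprfx_hijack dmap ips_to_note → Spec_can_subprfx_hijack dmap ips_to_note (can_subprfx_hijack dmap ips_to_note)

-- ===== LEMMAS AND PROOFS =====

lemma pvClassify_foldl (p24 roa badlen : List String) (ips : List String) (s : Bool × Bool × Bool × Bool × Bool × Bool) :
    ips.foldl (pvClassifyStep p24 roa badlen) s =
      (s.1 && ips.all (fun x => p24.contains x),
       s.2.1 && ips.all (fun x => roa.contains x),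
       s.2.2.1 && ips.all (fun x => roa.contains x && !(badlen.contains x)),
       s.2.2.2.1 && ips.all (fun x => p24.contains x || (roa.contains x && !(badlen.contains x))),
       s.2.2.2.2.1 || ips.any (fun x => roa.contains x),
       s.2.2.2.2.2 || ips.any (fun x => badlen.contains x)) := by
  induction ips generalizing s with
  | nil => simp
  | cons ip rest ih =>
    simp only [List.foldl_cons, ih, pvClassifyStep, List.all_cons, List.any_cons,
      Bool.and_assoc, Bool.or_assoc]

theorem can_subprfx_hijack_spec : Claim_equal_can_subprfx_hijack := by
  intro dmap ips_to_note _hdom _hpre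
  unfold Spec_can_subprfx_hijack can_subprfx_hijack can_subprfx_hijack_alt
  rw [PySem.Dict.items_foldl_insert_fresh _ _ _ _
        (by intro a _; simp [PySem.Dict.contains_empty])
        (by simpa [PySem.Dict.keys] using PySem.Dict.nodup_keys_ofList (ps := dmap))]
  apply List.map_congr_left
  intro item _
  simp only [pvClassify, pvClassify_foldl, Bool.true_and, Bool.false_or, List.not_any_eq_all_not]
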